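-- pv_equiv track=rewrite | github.com/zapatok/PDFoverseer | eval/pixel_density/sweep_combine.py | set_operation
-- ===== SOURCE A (Python) =====
-- def set_operation(
--     source_matches: dict[str, set[int]],
--     op: str,
-- ) -> list[int]:
--     """Set intersection or union of detector outputs.
--
--     Args:
--         source_matches: {name: set of detected cover pages}.
--         op: "intersection" or "union".
--
--     Returns:
--         Sorted list of cover page indices.
--     """
--     sets = list(source_matches.values())
--     if op == "intersection":
--         result = sets[0].copy()
--         for s in sets[1:]:
--             result &= s
--     elif op == "union":
--         result = sets[0].copy()
--         for s in sets[1:]: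
--             result |= s
--     else:
--         raise ValueError(f"Unknown op: {op!r}")
--
--     result_list = sorted(result)
--     if 0 not in result_list:
--         result_list.insert(0, 0)
--     return result_list
-- ===== SOURCE B (Python) =====
-- def set_operation(
--     source_matches: dict[str, set[int]],
--     op: str,
-- ) -> list[int]:
--     """Set intersection or union of detector outputs, via one counting pass."""
--     if op not in ("intersection", "union"):
--         raise ValueError(f"Unknown op: {op!r}")
--     sets = list(source_matches.values())
--     counts = {}
--     for s in sets:
--         for x in s:
--             counts[x] = counts.get(x, 0) + 1
--     need = 1 if op == "union" else len(sets)
--     result_list = sorted(k for k, c in counts.items() if c >= need)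
--     if 0 not in result_list:
--         result_list.insert(0, 0)
--     return result_list
-- ===== Notes on version B (the rewrite author's own statement) =====
-- stated objective: alternative
-- what changed: Replaces the iterated in-place set &=/|= folds with a single occurrence-count table over all detector sets (keep count==n for intersection, count>=1 for union), validating op up front.
import Mathlib
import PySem

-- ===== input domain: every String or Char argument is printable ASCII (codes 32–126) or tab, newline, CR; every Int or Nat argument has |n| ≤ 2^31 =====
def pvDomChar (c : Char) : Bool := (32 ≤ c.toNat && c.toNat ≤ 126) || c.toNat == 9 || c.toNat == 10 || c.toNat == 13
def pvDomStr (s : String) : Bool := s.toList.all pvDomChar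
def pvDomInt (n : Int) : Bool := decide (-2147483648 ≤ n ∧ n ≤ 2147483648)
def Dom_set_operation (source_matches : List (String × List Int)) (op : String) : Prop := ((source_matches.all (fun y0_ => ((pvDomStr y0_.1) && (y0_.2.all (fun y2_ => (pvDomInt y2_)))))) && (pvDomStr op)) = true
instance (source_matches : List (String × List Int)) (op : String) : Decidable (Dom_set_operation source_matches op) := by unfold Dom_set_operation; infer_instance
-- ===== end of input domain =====

-- B replaces A's iterated set intersections/unions by one occurrence-count table
-- (count == n keeps an index for 'intersection', count >= 1 for 'union'); same result.


-- ===== PORT A =====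
def set_operation (source_matches : List (String × List Int)) (op : String) : List Int :=
  -- sets = list(source_matches.values()); each value is a Python set (distinct elements)
  let sets : List (PySem.Set Int) := (PySem.Dict.ofList source_matches).values.map PySem.Set.ofList
  if op = "intersection" then
    match sets with
    | [] => []                           -- sets[0] raises IndexError; excluded by Pre_
    | s0 :: rest =>
      let result := rest.foldl (fun r s => PySem.Set.inter r s) s0
      let result_list := PySem.List.sorted result (fun x => x) false
      if 0 ∈ result_list then result_list else 0 :: result_list
  else if op = "union" then
    match sets with
    | [] => []                           -- sets[0] raises IndexError; excluded by Pre_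
    | s0 :: rest =>
      let result := rest.foldl (fun r s => PySem.Set.union r s) s0
      let result_list := PySem.List.sorted result (fun x => x) false
      if 0 ∈ result_list then result_list else 0 :: result_list
  else []                                -- raise ValueError; excluded by Pre_

-- ===== PORT B =====
def set_operation_alt (source_matches : List (String × List Int)) (op : String) : List Int :=
  if op ≠ "intersection" ∧ op ≠ "union" then []   -- raise ValueError; excluded by Pre_
  else
    let sets : List (PySem.Set Int) := (PySem.Dict.ofList source_matches).values.map PySem.Set.ofList
    let counts := sets.foldl (fun d s => s.foldl (fun d x => d.insert x (d.getD x 0 + 1)) d) PySem.Dict.empty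
    let need : Int := if op = "union" then 1 else (sets.length : Int)
    let result_list := PySem.List.sorted ((counts.items.filter (fun kc => decide (need ≤ kc.2))).map Prod.fst) (fun x => x) false
    if 0 ∈ result_list then result_list else 0 :: result_list

-- ===== PRECONDITION & SPEC =====
-- Pre_ excludes exactly the inputs where A raises: the empty dict (IndexError on sets[0])
-- and any op other than "intersection"/"union" (ValueError).
def Pre_set_operation (source_matches : List (String × List Int)) (op : String) : Prop :=
  source_matches ≠ [] ∧ (op = "intersection" ∨ op = "union")
instance (source_matches : List (String × List Int)) (op : String) : Decidable (Pre_set_operation source_matches op) := by unfold Pre_set_operation; infer_instance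
def pvWitness_set_operation : (List (String × List Int)) × String := ([("a", [2, 0]), ("b", [2, 3])], "intersection")

def Spec_set_operation (source_matches : List (String × List Int)) (op : String) (out : List Int) : Prop := out = set_operation_alt source_matches op
instance (source_matches : List (String × List Int)) (op : String) (out : List Int) : Decidable (Spec_set_operation source_matches op out) := by unfold Spec_set_operation; infer_instance

-- ===== CLAIM (what is proved, stated in full; the proofs are below) =====
def Claim_equal_set_operation : Prop := ∀ (source_matches : List (String × List Int)) (op : String), Dom_set_operation source_matches op → Pre_set_operation source_matches op → Spec_set_operation source_matches op (set_operation source_matches op)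

-- ===== LEMMAS AND PROOFS =====

theorem foldl_flatMap_eq (L : List (PySem.Set Int)) (d : PySem.Dict Int Int) :
    (L.flatMap (fun s => (s : List Int))).foldl (fun d x => d.insert x (d.getD x 0 + 1)) d
      = L.foldl (fun d s => s.foldl (fun d x => d.insert x (d.getD x 0 + 1)) d) d := by
  induction L generalizing d with
  | nil => rfl
  | cons t L ih =>
    rw [List.flatMap_cons, List.foldl_append, ih, List.foldl_cons]

-- B's nested counting loop is the counter of the concatenation of the sets.
theorem counts_eq_counter (sets : List (PySem.Set Int)) :
    sets.foldl (fun d s => s.foldl (fun d x => d.insert x (d.getD x 0 + 1)) d) PySem.Dict.empty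
      = PySem.Dict.counter (sets.flatMap (fun s => (s : List Int))) := by
  rw [← PySem.Dict.foldl_insert_getD_add_one_eq_counter, foldl_flatMap_eq]

-- membership in A's intersection fold
theorem mem_foldl_inter (s0 : PySem.Set Int) (L : List (PySem.Set Int)) (x : Int) :
    x ∈ L.foldl (fun r s => PySem.Set.inter r s) s0 ↔ x ∈ s0 ∧ ∀ s ∈ L, x ∈ s := by
  induction L generalizing s0 with
  | nil => simp
  | cons t L ih =>
    simp [ih, PySem.Set.mem_inter]
    tauto

-- membership in A's union fold
theorem mem_foldl_union (s0 : PySem.Set Int) (L : List (PySem.Set Int)) (x : Int) :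
    x ∈ L.foldl (fun r s => PySem.Set.union r s) s0 ↔ x ∈ s0 ∨ ∃ s ∈ L, x ∈ s := by
  induction L generalizing s0 with
  | nil => simp
  | cons t L ih =>
    simp [ih, PySem.Set.mem_union]
    tauto

theorem nodup_foldl_inter (s0 : PySem.Set Int) (L : List (PySem.Set Int)) (h : s0.Nodup) :
    (L.foldl (fun r s => PySem.Set.inter r s) s0).Nodup := by
  induction L generalizing s0 with
  | nil => exact h
  | cons t L ih => exact ih _ (PySem.Set.nodup_inter _ _ h)

theorem nodup_foldl_union (s0 : PySem.Set Int) (L : List (PySem.Set Int)) (h : s0.Nodup) :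
    (L.foldl (fun r s => PySem.Set.union r s) s0).Nodup := by
  induction L generalizing s0 with
  | nil => exact h
  | cons t L ih => exact ih _ (PySem.Set.nodup_union _ _ h)

-- count of x in the concatenation of nodup lists = number of lists containing x
theorem count_flatMap_nodup (L : List (PySem.Set Int)) (x : Int)
    (h : ∀ s ∈ L, List.Nodup s) :
    (L.flatMap (fun s => (s : List Int))).count x = L.countP (fun s => decide (x ∈ s)) := by
  induction L with
  | nil => simp
  | cons t L ih =>
    have ht : List.Nodup t := h t (by simp)
    have hrest : ∀ s ∈ L, List.Nodup s := fun s hs => h s (by simp [hs])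
    simp only [List.flatMap_cons, List.count_append, List.countP_cons, ih hrest]
    by_cases hx : x ∈ t
    · simp [hx, List.count_eq_one_of_mem ht hx, Nat.add_comm]
    · simp [hx, List.count_eq_zero_of_not_mem hx]

-- B's kept list, characterised
theorem mem_kept (sets : List (PySem.Set Int)) (need : Int) (x : Int) :
    x ∈ (((sets.foldl (fun d s => s.foldl (fun d x => d.insert x (d.getD x 0 + 1)) d) PySem.Dict.empty).items.filter
          (fun kc => decide (need ≤ kc.2))).map Prod.fst)
      ↔ x ∈ PySem.Set.ofList (sets.flatMap (fun s => (s : List Int)))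
          ∧ need ≤ ((sets.flatMap (fun s => (s : List Int))).count x : Int) := by
  rw [counts_eq_counter, PySem.Dict.items_counter]
  simp [List.mem_filter, List.mem_map]

theorem nodup_kept (sets : List (PySem.Set Int)) (need : Int) :
    (((sets.foldl (fun d s => s.foldl (fun d x => d.insert x (d.getD x 0 + 1)) d) PySem.Dict.empty).items.filter
          (fun kc => decide (need ≤ kc.2))).map Prod.fst).Nodup := by
  rw [counts_eq_counter, PySem.Dict.items_counter]
  refine List.Nodup.map_on ?_ (List.Nodup.filter _ (List.Nodup.map ?_ (PySem.Set.nodup_ofList _)))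
  · intro p hp q hq hfst
    have hp' := List.mem_of_mem_filter hp
    have hq' := List.mem_of_mem_filter hq
    simp only [List.mem_map] at hp' hq'
    obtain ⟨a, _, rfl⟩ := hp'
    obtain ⟨b, _, rfl⟩ := hq'
    simp only at hfst
    subst hfst
    rfl
  · intro a b hab
    exact congrArg Prod.fst hab

theorem items_foldl_insert_ne_nil (l : List (String × List Int)) (d : PySem.Dict String (List Int))
    (h : d.items ≠ []) :
    ((l.foldl (fun d p => d.insert p.1 p.2) d).items ≠ []) := by
  induction l generalizing d with
  | nil => exact h
  | cons q l ih =>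
    apply ih
    rw [PySem.Dict.items_insert]
    split
    · intro hmap
      exact h (List.map_eq_nil_iff.mp hmap)
    · simp

theorem values_ofList_ne_nil (p : String × List Int) (t : List (String × List Int)) :
    (PySem.Dict.ofList (p :: t)).values ≠ [] := by
  have hof : PySem.Dict.ofList (p :: t)
      = t.foldl (fun d q => d.insert q.1 q.2) ((PySem.Dict.empty : PySem.Dict String (List Int)).insert p.1 p.2) := rfl
  have h0 : ((PySem.Dict.empty : PySem.Dict String (List Int)).insert p.1 p.2).items ≠ [] := by
    simp [PySem.Dict.items_insert]
  have hit := items_foldl_insert_ne_nil t _ h0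
  rw [hof]
  intro hv
  apply hit
  have : (t.foldl (fun d q => d.insert q.1 q.2) ((PySem.Dict.empty : PySem.Dict String (List Int)).insert p.1 p.2)).values
      = (t.foldl (fun d q => d.insert q.1 q.2) ((PySem.Dict.empty : PySem.Dict String (List Int)).insert p.1 p.2)).items.map Prod.snd := rfl
  rw [this] at hv
  exact List.map_eq_nil_iff.mp hv

-- countP against Int-cast length: "count ≥ n ↔ x in every set"
theorem count_ge_length_iff (sets : List (PySem.Set Int)) (x : Int)
    (h : ∀ s ∈ sets, List.Nodup s) :
    ((sets.length : Int) ≤ ((sets.flatMap (fun s => (s : List Int))).count x : Int))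
      ↔ ∀ s ∈ sets, x ∈ s := by
  rw [count_flatMap_nodup sets x h, Int.ofNat_le]
  constructor
  · intro hle
    have hlen := List.countP_le_length (p := fun s => decide (x ∈ s)) (l := sets)
    have heq : sets.countP (fun s => decide (x ∈ s)) = sets.length := le_antisymm hlen hle
    intro s hs
    simpa using List.countP_eq_length.mp heq s hs
  · intro hall
    exact le_of_eq (List.countP_eq_length.mpr (fun s hs => by simpa using hall s hs)).symm

theorem one_le_count_iff (sets : List (PySem.Set Int)) (x : Int) :
    ((1 : Int) ≤ ((sets.flatMap (fun s => (s : List Int))).count x : Int))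
      ↔ ∃ s ∈ sets, x ∈ s := by
  have : (1 : Int) ≤ (((sets.flatMap (fun s => (s : List Int))).count x : Nat) : Int)
      ↔ 0 < (sets.flatMap (fun s => (s : List Int))).count x := by
    omega
  rw [this, List.count_pos_iff, List.mem_flatMap]

-- ===== VERDICT (by name: the statement is the Claim_ definition above) =====
theorem set_operation_spec : Claim_equal_set_operation := by
  intro sm op _ hpre
  obtain ⟨hne, hop⟩ := hpre
  obtain ⟨p, t, rfl⟩ : ∃ p t, sm = p :: t := by
    cases sm with
    | nil => exact absurd rfl hne
    | cons p t => exact ⟨p, t, rfl⟩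
  unfold Spec_set_operation set_operation set_operation_alt
  obtain ⟨v0, vrest, hv⟩ : ∃ v0 vrest, (PySem.Dict.ofList (p :: t)).values = v0 :: vrest := by
    cases hV : (PySem.Dict.ofList (p :: t)).values with
    | nil => exact absurd hV (values_ofList_ne_nil p t)
    | cons v0 vrest => exact ⟨v0, vrest, rfl⟩
  have hnd : ∀ s ∈ (PySem.Set.ofList v0 :: vrest.map PySem.Set.ofList), List.Nodup s := by
    intro s hs
    rcases List.mem_cons.mp hs with rfl | hs'
    · exact PySem.Set.nodup_ofList v0
    · obtain ⟨v, _, rfl⟩ := List.mem_map.mp hs'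
      exact PySem.Set.nodup_ofList v
  have hhead : PySem.Set.ofList v0 ∈ (PySem.Set.ofList v0 :: vrest.map PySem.Set.ofList) := by simp
  rcases hop with rfl | rfl
  · -- op = "intersection"
    simp only [hv, List.map_cons, String.reduceEq, ne_eq, not_false_eq_true, not_true_eq_false,
      and_true, if_true, if_false]
    have hmem : ∀ x, x ∈ (vrest.map PySem.Set.ofList).foldl (fun r s => PySem.Set.inter r s) (PySem.Set.ofList v0)
        ↔ x ∈ ((((PySem.Set.ofList v0 :: vrest.map PySem.Set.ofList).foldl
              (fun d s => s.foldl (fun d x => d.insert x (d.getD x 0 + 1)) d) PySem.Dict.empty).items.filter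
              (fun kc => decide (((PySem.Set.ofList v0 :: vrest.map PySem.Set.ofList).length : Int) ≤ kc.2))).map Prod.fst) := by
      intro x
      rw [mem_foldl_inter, mem_kept, count_ge_length_iff _ _ hnd]
      constructor
      · rintro ⟨h0, hr⟩
        have hall : ∀ s ∈ (PySem.Set.ofList v0 :: vrest.map PySem.Set.ofList), x ∈ s := by
          intro s hs
          rcases List.mem_cons.mp hs with rfl | hs'
          · exact h0
          · exact hr s hs'
        refine ⟨?_, hall⟩
        rw [PySem.Set.mem_ofList, List.mem_flatMap]
        exact ⟨PySem.Set.ofList v0, hhead, h0⟩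
      · rintro ⟨-, hall⟩
        exact ⟨hall _ hhead, fun s hs => hall s (List.mem_cons_of_mem _ hs)⟩
    have hA := nodup_foldl_inter (PySem.Set.ofList v0) (vrest.map PySem.Set.ofList) (PySem.Set.nodup_ofList v0)
    have hB := nodup_kept (PySem.Set.ofList v0 :: vrest.map PySem.Set.ofList)
        ((PySem.Set.ofList v0 :: vrest.map PySem.Set.ofList).length : Int)
    have hperm := (List.perm_ext_iff_of_nodup hA hB).mpr hmem
    have hsrt := (PySem.List.sorted_id_eq_sorted_id_iff_perm _ _).mpr hperm
    simp only [hsrt]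
  · -- op = "union"
    simp only [hv, List.map_cons, String.reduceEq, ne_eq, not_false_eq_true, not_true_eq_false,
      and_false, if_true, if_false]
    have hmem : ∀ x, x ∈ (vrest.map PySem.Set.ofList).foldl (fun r s => PySem.Set.union r s) (PySem.Set.ofList v0)
        ↔ x ∈ ((((PySem.Set.ofList v0 :: vrest.map PySem.Set.ofList).foldl
              (fun d s => s.foldl (fun d x => d.insert x (d.getD x 0 + 1)) d) PySem.Dict.empty).items.filter
              (fun kc => decide ((1 : Int) ≤ kc.2))).map Prod.fst) := by
      intro x
      rw [mem_foldl_union, mem_kept, one_le_count_iff]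
      constructor
      · rintro (h0 | ⟨s, hs, hx⟩)
        · refine ⟨?_, ⟨PySem.Set.ofList v0, hhead, h0⟩⟩
          rw [PySem.Set.mem_ofList, List.mem_flatMap]
          exact ⟨PySem.Set.ofList v0, hhead, h0⟩
        · refine ⟨?_, ⟨s, List.mem_cons_of_mem _ hs, hx⟩⟩
          rw [PySem.Set.mem_ofList, List.mem_flatMap]
          exact ⟨s, List.mem_cons_of_mem _ hs, hx⟩
      · rintro ⟨-, s, hs, hx⟩
        rcases List.mem_cons.mp hs with rfl | hs'
        · exact Or.inl hx
        · exact Or.inr ⟨s, hs', hx⟩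
    have hA := nodup_foldl_union (PySem.Set.ofList v0) (vrest.map PySem.Set.ofList) (PySem.Set.nodup_ofList v0)
    have hB := nodup_kept (PySem.Set.ofList v0 :: vrest.map PySem.Set.ofList) (1 : Int)
    have hperm := (List.perm_ext_iff_of_nodup hA hB).mpr hmem
    have hsrt := (PySem.List.sorted_id_eq_sorted_id_iff_perm _ _).mpr hperm
    simp only [hsrt]
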